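-- pv_equiv track=rewrite | github.com/PISANKINA/ewercis | ex19.py | count
-- ===== SOURCE A (Python) =====
-- def count(a,b):
--     if a == b:
--         return 1
--     else:
--         if a > b:
--             return 1 + count(a-b, b)
--         else:
--             return 1 + count(a, b-a)
-- ===== SOURCE B (Python) =====
-- def count(a, b):
--     # Euclidean quotient-sum: total subtraction steps of the subtractive gcd,
--     # computed with // and % in O(log min(a, b)) iterations.
--     total = 0
--     while b != 0:
--         total += a // b
--         a, b = b, a % b
--     return total
-- ===== Notes on version B (the rewrite author's own statement) =====
-- stated objective: faster
-- what changed: Replaces A's one-subtraction-per-recursive-call subtractive gcd with an iterative Euclidean loop that sums the quotients (total += a // b; a, b = b, a % b), turning O(a/gcd + b/gcd) steps into O(log min(a,b)).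
-- intended difference: On the single unspecified corner (0, 0), where gcd(0,0) does not exist, A returns 1 via its equality base case while B returns 0 (the empty Euclidean quotient sum) — an equally valid choice that falls naturally out of B's algorithm. — e.g. on count(0, 0): A returns 1, B returns 0
import Mathlib
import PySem

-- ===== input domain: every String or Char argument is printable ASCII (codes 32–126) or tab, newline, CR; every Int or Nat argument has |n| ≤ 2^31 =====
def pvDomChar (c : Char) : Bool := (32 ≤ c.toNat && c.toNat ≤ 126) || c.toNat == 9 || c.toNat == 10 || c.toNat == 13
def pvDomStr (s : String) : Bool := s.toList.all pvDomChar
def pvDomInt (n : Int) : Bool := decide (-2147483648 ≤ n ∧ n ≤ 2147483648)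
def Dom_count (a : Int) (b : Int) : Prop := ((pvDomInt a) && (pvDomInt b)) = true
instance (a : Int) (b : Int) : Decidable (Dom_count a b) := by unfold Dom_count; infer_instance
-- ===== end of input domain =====

-- B replaces A's one-subtraction-per-call recursion by the Euclidean quotient sum (// and %): asymptotically faster.

-- ===== PORT A =====
-- A's recursion has no base case for inputs outside Pre_count (it recurses forever there);
-- the port uses fuel (a+b).toNat + 1, which suffices on Pre_count since every recursive
-- call strictly decreases a + b while both arguments stay ≥ 1.
def countFuel : Nat → Int → Int → Int
  | 0, _, _ => 0
  | n+1, a, b =>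
    if a = b then 1
    else if a > b then 1 + countFuel n (a - b) b
    else 1 + countFuel n a (b - a)

def count (a : Int) (b : Int) : Int := countFuel ((a + b).toNat + 1) a b

-- ===== PORT B =====
-- termination of the while loop: |a % b| < |b| for b ≠ 0 (Python %, sign of divisor)
theorem pvModAbsLt (a b : Int) (h : ¬ b = 0) : (PySem.Int.mod a b).natAbs < b.natAbs := by
  rcases lt_or_gt_of_ne h with hb | hb
  · have h1 : Int.fmod (-a) (-b) < -b := Int.fmod_lt_of_pos (-a) (by omega)
    have h2 : 0 ≤ Int.fmod (-a) (-b) := Int.fmod_nonneg_of_pos (-a) (by omega)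
    rw [Int.neg_fmod_neg] at h1 h2
    show (Int.fmod a b).natAbs < b.natAbs
    omega
  · have h1 : Int.fmod a b < b := Int.fmod_lt_of_pos a hb
    have h2 : 0 ≤ Int.fmod a b := Int.fmod_nonneg_of_pos a hb
    show (Int.fmod a b).natAbs < b.natAbs
    omega

-- the 'while b != 0' loop of Source B, with its accumulator 'total'
def countAltLoop (total : Int) (a : Int) (b : Int) : Int :=
  if _h : b = 0 then total
  else countAltLoop (total + PySem.Int.floordiv a b) b (PySem.Int.mod a b)
termination_by b.natAbs
decreasing_by exact pvModAbsLt a b _h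

def count_alt (a : Int) (b : Int) : Int := countAltLoop 0 a b

-- ===== PRECONDITION & SPEC =====
-- Pre_count is exactly where A returns: it excludes the inputs on which A recurses forever
-- and raises RecursionError (every a ≠ b with a ≤ 0 or b ≤ 0).
def Pre_count (a : Int) (b : Int) : Prop := (1 ≤ a ∧ 1 ≤ b) ∨ a = b
instance (a : Int) (b : Int) : Decidable (Pre_count a b) := by unfold Pre_count; infer_instance

def pvWitness_count : Int × Int := (12, 8)

-- On the single unspecified corner (0, 0) — gcd(0,0) does not exist — A returns 1 through its
-- equality base case while B returns 0, the empty Euclidean quotient sum, the natural value of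
-- B's algorithm and an equally valid choice on this corner.
def D_count (a : Int) (b : Int) : Prop := a = 0 ∧ b = 0
instance (a : Int) (b : Int) : Decidable (D_count a b) := by unfold D_count; infer_instance

def Spec_count (a : Int) (b : Int) (out : Int) : Prop := ¬ D_count a b → out = count_alt a b
instance (a : Int) (b : Int) (out : Int) : Decidable (Spec_count a b out) := by unfold Spec_count; infer_instance

def pvDiffWitness_count : Int × Int := (0, 0)
def pvDiffWitnessOut_count : Int × Int := (1, 0)

-- ===== CLAIM (what is proved, stated in full; the proofs are below) =====
def Claim_unchanged_count : Prop := ∀ (a : Int) (b : Int), Dom_count a b → Pre_count a b → Spec_count a b (count a b)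
def Claim_changed_count : Prop := Dom_count (pvDiffWitness_count.1) (pvDiffWitness_count.2) ∧ Pre_count (pvDiffWitness_count.1) (pvDiffWitness_count.2) ∧ D_count (pvDiffWitness_count.1) (pvDiffWitness_count.2) ∧ count (pvDiffWitness_count.1) (pvDiffWitness_count.2) = pvDiffWitnessOut_count.1 ∧ count_alt (pvDiffWitness_count.1) (pvDiffWitness_count.2) = pvDiffWitnessOut_count.2 ∧ pvDiffWitnessOut_count.1 ≠ pvDiffWitnessOut_count.2
def Claim_exact_count : Prop := ∀ (a : Int) (b : Int), Dom_count a b → Pre_count a b → D_count a b → count a b ≠ count_alt a b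

-- ===== LEMMAS AND PROOFS =====

-- the accumulator splits off
theorem E_zero (a : Int) : countAltLoop 0 a 0 = 0 := by
  rw [countAltLoop]; simp

theorem altLoop_add : ∀ (n : Nat) (t a b : Int), b.natAbs ≤ n →
    countAltLoop t a b = t + countAltLoop 0 a b := by
  intro n
  induction n with
  | zero =>
    intro t a b hb
    have hb0 : b = 0 := by omega
    subst hb0
    rw [countAltLoop, E_zero]
    simp
  | succ n ih =>
    intro t a b hb
    by_cases h0 : b = 0
    · subst h0
      rw [countAltLoop, E_zero]
      simp
    · rw [countAltLoop]
      conv_rhs => rw [countAltLoop]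
      simp only [h0, dite_false]
      have hlt := pvModAbsLt a b h0
      rw [ih (t + PySem.Int.floordiv a b) b (PySem.Int.mod a b) (by omega),
          ih (0 + PySem.Int.floordiv a b) b (PySem.Int.mod a b) (by omega)]
      ring

theorem E_step (a b : Int) (h : b ≠ 0) :
    countAltLoop 0 a b = PySem.Int.floordiv a b + countAltLoop 0 b (PySem.Int.mod a b) := by
  rw [countAltLoop]
  simp only [h, dite_false]
  rw [altLoop_add (PySem.Int.mod a b).natAbs _ b _ (le_refl _)]
  ring

-- on equal nonzero arguments the loop returns 1
theorem E_self (a : Int) (h : a ≠ 0) : countAltLoop 0 a a = 1 := by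
  rw [E_step a a h]
  have h1 : PySem.Int.floordiv a a = 1 := by
    show Int.fdiv a a = 1
    exact Int.fdiv_self h
  have h2 : PySem.Int.mod a a = 0 := by
    show Int.fmod a a = 0
    exact Int.fmod_self
  rw [h1, h2, E_zero]
  norm_num

-- adding b to the first argument adds exactly one to the quotient sum
theorem E_add_self (a b : Int) (h : b ≠ 0) :
    countAltLoop 0 (a + b) b = 1 + countAltLoop 0 a b := by
  rw [E_step (a + b) b h, E_step a b h]
  have h1 : PySem.Int.floordiv (a + b) b = PySem.Int.floordiv a b + 1 := by
    show Int.fdiv (a + b) b = Int.fdiv a b + 1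
    have := Int.add_mul_fdiv_right a 1 h
    simpa using this
  have h2 : PySem.Int.mod (a + b) b = PySem.Int.mod a b := by
    show Int.fmod (a + b) b = Int.fmod a b
    exact Int.add_fmod_right a b
  rw [h1, h2]
  ring

-- for 0 ≤ a < b a single unfolding swaps the arguments
theorem E_swap_lt (a b : Int) (h0 : 0 ≤ a) (h : a < b) :
    countAltLoop 0 a b = countAltLoop 0 b a := by
  have hb : b ≠ 0 := by omega
  rw [E_step a b hb]
  have h1 : PySem.Int.floordiv a b = 0 := by
    rw [PySem.Int.floordiv_eq_ediv_of_pos (by omega)]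
    exact Int.ediv_eq_zero_of_lt h0 h
  have h2 : PySem.Int.mod a b = a := by
    rw [PySem.Int.mod_eq_emod_of_pos (by omega)]
    exact Int.emod_eq_of_lt h0 h
  rw [h1, h2]
  ring

theorem E_comm (a b : Int) (ha : 1 ≤ a) (hb : 1 ≤ b) :
    countAltLoop 0 a b = countAltLoop 0 b a := by
  rcases lt_trichotomy a b with h | h | h
  · exact E_swap_lt a b (by omega) h
  · rw [h]
  · exact (E_swap_lt b a (by omega) h).symm

-- the heart: on positive inputs the fuelled subtractive recursion equals the quotient sum
theorem countFuel_eq : ∀ (n : Nat) (a b : Int), 1 ≤ a → 1 ≤ b → (a + b).toNat ≤ n →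
    countFuel n a b = countAltLoop 0 a b := by
  intro n
  induction n with
  | zero => intro a b ha hb hn; omega
  | succ n ih =>
    intro a b ha hb hn
    rw [countFuel]
    by_cases heq : a = b
    · rw [heq] at *
      simp only [reduceIte]
      exact (E_self b (by omega)).symm
    · simp only [heq, if_false]
      by_cases hgt : a > b
      · simp only [hgt, if_true]
        rw [ih (a - b) b (by omega) hb (by omega)]
        have := E_add_self (a - b) b (by omega)
        simpa using this.symm
      · simp only [hgt, if_false]
        rw [ih a (b - a) ha (by omega) (by omega)]
        rw [E_comm a b ha hb]
        rcases lt_trichotomy a (b - a) with h | h | h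
        · rw [E_swap_lt a (b - a) (by omega) h]
          have := E_add_self (b - a) a (by omega)
          simpa using this.symm
        · have hb2 : b = a + a := by omega
          rw [hb2]
          simp only [add_sub_cancel_right]
          exact (E_add_self a a (by omega)).symm
        · rw [← E_swap_lt (b - a) a (by omega) h]
          have := E_add_self (b - a) a (by omega)
          simpa using this.symm

-- ===== VERDICT (by name: the statement is the Claim_ definition above) =====
theorem count_spec : Claim_unchanged_count := by
  intro a b _ hpre hD
  unfold count count_alt
  rcases hpre with ⟨ha, hb⟩ | heq
  · exact countFuel_eq ((a + b).toNat + 1) a b ha hb (by omega)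
  · have hne : a ≠ 0 := by
      intro h0
      exact hD ⟨h0, by omega⟩
    rw [heq] at *
    rw [countFuel]
    simp only [reduceIte]
    exact (E_self b hne).symm

theorem count_changed : Claim_changed_count := by
  unfold Claim_changed_count
  refine ⟨by decide, by decide, by decide, by decide, ?_, by decide⟩
  show countAltLoop 0 0 0 = 0
  exact E_zero 0

theorem count_tight : Claim_exact_count := by
  intro a b _ _ hD
  rcases hD with ⟨h0, h1⟩
  subst h0; subst h1
  have hB : count_alt 0 0 = 0 := E_zero 0
  rw [hB]
  decide
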